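-- pv_equiv track=rewrite | github.com/RituChandwani/DataAnalytics | Algo- Unique word/Solution.py | getHighestLetterCount
-- ===== SOURCE A (Python) =====
-- from collections import defaultdict
--
-- def getHighestLetterCount(inputStr):
--     tempStr=inputStr.lower()
--     freqCount ={}
--     chars = defaultdict(int)
--     for char in tempStr:
--         chars[char] += 1
--     highest=max(chars.values())
--     for k,v in chars.items():
--         if v == highest:
--             freqCount[k]=v
--     return freqCount
-- ===== SOURCE B (Python) =====
-- from itertools import groupby
--
-- def getHighestLetterCount(inputStr):
--     temp = inputStr.lower()
--     counts = {c: len(list(g)) for c, g in groupby(sorted(temp))}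
--     highest = max(counts.values())
--     return {c: highest for c in temp if counts[c] == highest}
-- ===== Notes on version B (the rewrite author's own statement) =====
-- stated objective: alternative
-- what changed: Replaces the defaultdict counting loop and explicit filter loop with a sort-then-groupby pass that builds the counts from runs of equal characters, then a dict comprehension over the string for the tied maximum characters.
import Mathlib
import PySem

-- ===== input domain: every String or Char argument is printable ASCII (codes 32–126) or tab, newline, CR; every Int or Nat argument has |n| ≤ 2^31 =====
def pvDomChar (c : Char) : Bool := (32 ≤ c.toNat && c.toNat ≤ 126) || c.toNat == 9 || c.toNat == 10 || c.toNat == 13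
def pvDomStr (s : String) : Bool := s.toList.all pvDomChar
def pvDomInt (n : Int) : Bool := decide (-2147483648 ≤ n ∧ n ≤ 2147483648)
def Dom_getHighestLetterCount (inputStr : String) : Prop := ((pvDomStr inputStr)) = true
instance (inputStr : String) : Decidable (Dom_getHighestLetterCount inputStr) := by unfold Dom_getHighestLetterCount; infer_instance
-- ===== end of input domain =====

-- B builds the character counts by sorting and grouping equal runs instead of a dict-counting loop;
-- the equivalence is about the returned dict (as a List (String × Int) in insertion order).

-- ===== PORT A =====
-- Python's one-character strings are modelled as Char inside; wrapped to String at the return boundary.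
def getHighestLetterCount (inputStr : String) : List (String × Int) :=
  let tempStr := (PySem.Str.lower inputStr).toList
  let chars := tempStr.foldl (fun d c => d.modify c 0 (· + 1)) (PySem.Dict.empty : PySem.Dict Char Int)
  match PySem.List.max? (PySem.Dict.values chars) (fun v => v) with
  | none => []   -- unreachable under Pre_ (Python raises ValueError on an empty string)
  | some highest =>
    let freqCount := (PySem.Dict.items chars).foldl
      (fun fc kv => if kv.2 == highest then fc.insert kv.1 kv.2 else fc)
      (PySem.Dict.empty : PySem.Dict Char Int)
    freqCount.items.map (fun kv => (String.ofList [kv.1], kv.2))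

-- ===== PORT B =====
-- itertools.groupby over a sorted list: the runs of equal characters with their lengths
def pvRuns (l : List Char) : List (Char × Int) :=
  match l with
  | [] => []
  | c :: rest =>
      (c, 1 + ((rest.takeWhile (· == c)).length : Int)) :: pvRuns (rest.dropWhile (· == c))
termination_by l.length
decreasing_by simpa using Nat.lt_succ_of_le (List.length_dropWhile_le _ _)

def getHighestLetterCount_alt (inputStr : String) : List (String × Int) :=
  let temp := (PySem.Str.lower inputStr).toList
  let counts := PySem.Dict.ofList (pvRuns (PySem.List.sorted temp (fun x => x)))
  match PySem.List.max? (PySem.Dict.values counts) (fun v => v) with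
  | none => []   -- unreachable under Pre_ (Python raises ValueError on an empty string)
  | some highest =>
    (temp.foldl (fun d c => if counts.getD c 0 == highest then d.insert c highest else d)
      (PySem.Dict.empty : PySem.Dict Char Int)).items.map (fun kv => (String.ofList [kv.1], kv.2))

-- ===== PRECONDITION & SPEC =====
-- Pre_ excludes only the empty string, on which both Pythons raise ValueError (max() of an empty sequence).
def Pre_getHighestLetterCount (inputStr : String) : Prop := inputStr ≠ ""
instance (inputStr : String) : Decidable (Pre_getHighestLetterCount inputStr) := by
  unfold Pre_getHighestLetterCount; infer_instance
def pvWitness_getHighestLetterCount : String := "aAb!"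

def Spec_getHighestLetterCount (inputStr : String) (out : List (String × Int)) : Prop :=
  out = getHighestLetterCount_alt inputStr
instance (inputStr : String) (out : List (String × Int)) : Decidable (Spec_getHighestLetterCount inputStr out) := by
  unfold Spec_getHighestLetterCount; infer_instance

-- ===== CLAIM (what is proved, stated in full; the proofs are below) =====
def Claim_equal_getHighestLetterCount : Prop := ∀ (inputStr : String), Dom_getHighestLetterCount inputStr → Pre_getHighestLetterCount inputStr → Spec_getHighestLetterCount inputStr (getHighestLetterCount inputStr)

-- ===== LEMMAS AND PROOFS =====



-- all elements after the run of c are strictly greater than c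
theorem pvDrop_gt (c : Char) (rest : List Char) (hp : (c :: rest).Pairwise (· ≤ ·)) :
    ∀ y ∈ rest.dropWhile (· == c), c < y := by
  have hall : ∀ x ∈ rest, c ≤ x := (List.pairwise_cons.mp hp).1
  have hps : (rest.dropWhile (· == c)).Pairwise (· ≤ ·) :=
    (List.pairwise_cons.mp hp).2.sublist (List.dropWhile_sublist _)
  intro y hy
  rcases hd : rest.dropWhile (· == c) with _ | ⟨h0, tl⟩
  · simp [hd] at hy
  · have hh0 : (h0 == c) = false := by
      have := List.head_dropWhile_not (· == c) (l := rest) (by simp [hd])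
      simpa [hd] using this
    have hne : h0 ≠ c := by simpa using hh0
    have hc0 : c < h0 :=
      lt_of_le_of_ne (hall h0 ((List.dropWhile_sublist (· == c)).subset (by simp [hd]))) (Ne.symm hne)
    rw [hd] at hy
    rcases List.mem_cons.mp hy with rfl | hmem
    · exact hc0
    · have : h0 ≤ y := ((List.pairwise_cons.mp (hd ▸ hps)).1) y hmem
      exact lt_of_lt_of_le hc0 this

-- combined spec of pvRuns on a sorted list
theorem pvRuns_spec (l : List Char) (hs : l.Pairwise (· ≤ ·)) :
    ((pvRuns l).map Prod.fst).Nodup ∧ (∀ c, c ∈ (pvRuns l).map Prod.fst ↔ c ∈ l) ∧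
      ∀ p ∈ pvRuns l, p.2 = (l.count p.1 : Int) := by
  induction l using pvRuns.induct with
  | case1 => simp [pvRuns]
  | case2 c rest ih =>
    have hgt := pvDrop_gt c rest hs
    have hps : (rest.dropWhile (· == c)).Pairwise (· ≤ ·) :=
      (List.pairwise_cons.mp hs).2.sublist (List.dropWhile_sublist _)
    obtain ⟨ihn, ihm, ihc⟩ := ih hps
    have hmemr : ∀ x ∈ (pvRuns (rest.dropWhile (· == c))).map Prod.fst, c < x := by
      intro x hx; exact hgt x ((ihm x).mp hx)
    have htake : ∀ x ∈ rest.takeWhile (· == c), x = c := by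
      intro x hx; simpa using List.mem_takeWhile_imp hx
    have hsplit : rest = rest.takeWhile (· == c) ++ rest.dropWhile (· == c) :=
      (List.takeWhile_append_dropWhile).symm
    refine ⟨?_, ?_, ?_⟩
    · rw [pvRuns]
      simp only [List.map_cons, List.nodup_cons]
      exact ⟨fun hc => lt_irrefl c (hmemr c hc), ihn⟩
    · intro x
      rw [pvRuns]
      simp only [List.map_cons, List.mem_cons, ihm]
      constructor
      · rintro (rfl | hx)
        · simp
        · right; exact (List.dropWhile_sublist (· == c)).subset hx
      · rintro (rfl | hx)
        · left; rfl
        · rw [hsplit] at hx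
          rcases List.mem_append.mp hx with hx | hx
          · left; exact htake x hx
          · right; exact hx
    · intro p hp
      rw [pvRuns] at hp
      rcases List.mem_cons.mp hp with rfl | hp
      · -- the head run
        have hcount_take : (rest.takeWhile (· == c)).count c = (rest.takeWhile (· == c)).length := by
          apply List.count_eq_length.mpr
          intro x hx; exact ((htake x hx) ▸ rfl)
        have hnotin : c ∉ rest.dropWhile (· == c) := fun hmem => lt_irrefl c (hgt c hmem)
        have hrest : rest.count c = (rest.takeWhile (· == c)).length := by
          conv_lhs => rw [hsplit]
          rw [List.count_append, List.count_eq_zero.mpr hnotin, hcount_take]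
          omega
        simp [hrest]
        omega
      · have h1 : p.2 = ((rest.dropWhile (· == c)).count p.1 : Int) := ihc p hp
        have hmem1 : p.1 ∈ (pvRuns (rest.dropWhile (· == c))).map Prod.fst :=
          List.mem_map.mpr ⟨p, hp, rfl⟩
        have hlt : c < p.1 := hmemr _ hmem1
        have hne : p.1 ≠ c := fun h => lt_irrefl c (h ▸ hlt)
        have hnin_take : p.1 ∉ rest.takeWhile (· == c) := fun h => hne (htake _ h)
        have hrest : rest.count p.1 = (rest.dropWhile (· == c)).count p.1 := by
          conv_lhs => rw [hsplit]
          rw [List.count_append, List.count_eq_zero.mpr hnin_take]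
          omega
        rw [h1]
        simp only [List.count_cons, hrest]
        have : ¬ c = p.1 := fun h => hne h.symm
        simp [this]

-- max over id is invariant under permutation (the max VALUE is well-defined)
theorem pvMax_id_perm (va vb : List Int) (h : va.Perm vb) :
    PySem.List.max? va (fun v => v) = PySem.List.max? vb (fun v => v) := by
  rcases hva : PySem.List.max? va (fun v => v) with _ | a
  · rw [(PySem.List.max?_eq_none_iff va _).mp hva] at h
    rw [(PySem.List.max?_eq_none_iff vb _).mpr h.symm.eq_nil]
  · rcases hvb : PySem.List.max? vb (fun v => v) with _ | b
    · rw [(PySem.List.max?_eq_none_iff vb _).mp hvb] at h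
      rw [h.eq_nil] at hva
      simp [PySem.List.max?] at hva
    · have hab : a ≤ b := PySem.List.max?_isMax hvb a (h.mem_iff.mp (PySem.List.max?_mem hva))
      have hba : b ≤ a := PySem.List.max?_isMax hva b (h.mem_iff.mpr (PySem.List.max?_mem hvb))
      rw [le_antisymm hab hba]

-- every value in the constant-insert fold is the inserted constant
theorem pvFold_values_const (H : Int) (l : List Char) (d : PySem.Dict Char Int)
    (hd : ∀ v ∈ d.values, v = H) :
    ∀ v ∈ (l.foldl (fun d c => d.insert c H) d).values, v = H := by
  induction l generalizing d with
  | nil => exact hd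
  | cons c l ih =>
    intro v hv
    refine ih (d.insert c H) ?_ v hv
    intro w hw
    rcases PySem.Dict.mem_values_insert d c H w hw with rfl | hw
    · rfl
    · exact hd w hw

-- a dict with nodup keys whose values are all H has items keys.map (·, H)
theorem pvItems_const (H : Int) (d : PySem.Dict Char Int) (hnd : d.keys.Nodup)
    (hv : ∀ v ∈ d.values, v = H) :
    d.items = d.keys.map (fun k => (k, H)) := by
  rw [PySem.Dict.items_eq_map_keys d hnd 0]
  apply List.map_congr_left
  intro k hk
  have : (k, d.getD k 0) ∈ d.items := by
    rw [PySem.Dict.items_eq_map_keys d hnd 0]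
    exact List.mem_map.mpr ⟨k, hk, rfl⟩
  have : d.getD k 0 ∈ d.values := List.mem_map.mpr ⟨_, this, rfl⟩
  rw [hv _ this]

-- Set.add commutes with filter
theorem pvAdd_filter (p : Char → Bool) (s : PySem.Set Char) (c : Char) :
    (PySem.Set.add s c).filter p =
      if p c then PySem.Set.add (s.filter p) c else s.filter p := by
  by_cases hmem : c ∈ s
  · by_cases hc : p c
    · have hmf : c ∈ s.filter p := List.mem_filter.mpr ⟨hmem, hc⟩
      simp [PySem.Set.add, PySem.Set.contains, hmem, hmf, hc]
    · simp [PySem.Set.add, PySem.Set.contains, hmem, hc]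
  · by_cases hc : p c
    · have hmf : c ∉ s.filter p := fun h => hmem (List.mem_filter.mp h).1
      simp [PySem.Set.add, PySem.Set.contains, hmem, hmf, hc, List.filter_append]
    · simp [PySem.Set.add, PySem.Set.contains, hmem, hc, List.filter_append]

-- Set.update commutes with filter
theorem pvUpdate_filter (p : Char → Bool) (l : List Char) (s : PySem.Set Char) :
    PySem.Set.update (s.filter p) (l.filter p) = (PySem.Set.update s l).filter p := by
  induction l generalizing s with
  | nil => rfl
  | cons c l ih =>
    by_cases hc : p c
    · simp only [List.filter_cons, hc, if_pos, PySem.Set.update, List.foldl_cons]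
      rw [show PySem.Set.add (s.filter p) c = (PySem.Set.add s c).filter p by
        rw [pvAdd_filter, if_pos hc]]
      exact ih (PySem.Set.add s c)
    · simp only [List.filter_cons, hc, Bool.false_eq_true, if_false, PySem.Set.update,
        List.foldl_cons]
      rw [show s.filter p = (PySem.Set.add s c).filter p by rw [pvAdd_filter, if_neg hc]]
      exact ih (PySem.Set.add s c)

theorem pvOfList_filter (p : Char → Bool) (l : List Char) :
    PySem.Set.ofList (l.filter p) = (PySem.Set.ofList l).filter p := by
  have := pvUpdate_filter p l PySem.Set.empty
  simpa [PySem.Set.update, PySem.Set.ofList, PySem.Set.empty] using this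

-- ===== VERDICT (by name: the statement is the Claim_ definition above) =====

theorem getHighestLetterCount_spec : Claim_equal_getHighestLetterCount := by
  intro inputStr _ _
  unfold Spec_getHighestLetterCount
  simp only [getHighestLetterCount, getHighestLetterCount_alt]
  rw [← PySem.Dict.counter_eq_foldl]
  set t := (PySem.Str.lower inputStr).toList with ht
  set s := PySem.List.sorted t (fun x => x) with hsdef
  obtain ⟨hnodB, hmemB, hcntB⟩ := pvRuns_spec s (PySem.List.sorted_pairwise t (fun x => x))
  have hperm_st : s.Perm t := PySem.List.sorted_perm t (fun x => x) false
  have hcnt' : ∀ p ∈ pvRuns s, p.2 = (t.count p.1 : Int) := by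
    intro p hp; rw [hcntB p hp, hperm_st.count_eq]
  -- the grouped dict of B: its items are exactly the runs
  have hitems : (PySem.Dict.ofList (pvRuns s) : PySem.Dict Char Int).items = pvRuns s := by
    show ((pvRuns s).foldl (fun acc p => acc.insert p.1 p.2) PySem.Dict.empty).items = pvRuns s
    rw [PySem.Dict.items_foldl_insert_fresh (pvRuns s) Prod.fst Prod.snd PySem.Dict.empty
      (by intro a _; simp [PySem.Dict.contains_empty]) hnodB]
    simp [PySem.Dict.empty]
  have hkeys : (PySem.Dict.ofList (pvRuns s) : PySem.Dict Char Int).keys = (pvRuns s).map Prod.fst := by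
    simp only [PySem.Dict.keys, hitems]
  have hvalsB : (PySem.Dict.ofList (pvRuns s) : PySem.Dict Char Int).values = (pvRuns s).map Prod.snd := by
    simp only [PySem.Dict.values, hitems]
  have hvalsA : (PySem.Dict.counter t : PySem.Dict Char Int).values
      = (PySem.Set.ofList t).map (fun k => (t.count k : Int)) := by
    simp [PySem.Dict.values, PySem.Dict.items_counter, List.map_map, Function.comp]
  have hkeysperm : ((pvRuns s).map Prod.fst).Perm (PySem.Set.ofList t) :=
    (List.perm_ext_iff_of_nodup hnodB (PySem.Set.nodup_ofList t)).mpr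
      (fun a => by rw [hmemB, PySem.Set.mem_ofList, hperm_st.mem_iff])
  have hvb : (pvRuns s).map Prod.snd = ((pvRuns s).map Prod.fst).map (fun k => (t.count k : Int)) := by
    rw [List.map_map]
    exact List.map_congr_left (fun p hp => hcnt' p hp)
  have hgetD : ∀ c ∈ t, (PySem.Dict.ofList (pvRuns s) : PySem.Dict Char Int).getD c 0
      = (t.count c : Int) := by
    intro c hc
    obtain ⟨p, hp, hp1⟩ := List.mem_map.mp ((hmemB c).mpr (hperm_st.mem_iff.mpr hc))
    have hmemit : (c, p.2) ∈ (PySem.Dict.ofList (pvRuns s) : PySem.Dict Char Int).items := by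
      rw [hitems, ← hp1]; exact hp
    rw [PySem.Dict.getD_of_mem_items _ hmemit (by rw [hkeys]; exact hnodB) 0, hcnt' p hp, hp1]
  have hmax : PySem.List.max? ((PySem.Dict.counter t : PySem.Dict Char Int).values) (fun v => v)
      = PySem.List.max? ((PySem.Dict.ofList (pvRuns s) : PySem.Dict Char Int).values) (fun v => v) := by
    rw [hvalsA, hvalsB, hvb]
    exact pvMax_id_perm _ _ ((hkeysperm.map _).symm)
  rw [hmax]
  rcases hm : PySem.List.max? ((PySem.Dict.ofList (pvRuns s) : PySem.Dict Char Int).values) (fun v => v)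
    with _ | H
  · rfl
  · -- A's filter loop over the counter items
    have hA : ((PySem.Dict.counter t : PySem.Dict Char Int).items.foldl
        (fun fc kv => if kv.2 == H then fc.insert kv.1 kv.2 else fc) PySem.Dict.empty).items
        = ((PySem.Set.ofList t).filter (fun k => (t.count k : Int) == H)).map (fun k => (k, H)) := by
      rw [PySem.List.foldl_if_eq_foldl_filter (fun (kv : Char × Int) => kv.2 == H)
        (fun (fc : PySem.Dict Char Int) (kv : Char × Int) => fc.insert kv.1 kv.2)]
      rw [PySem.Dict.items_counter, List.filter_map]
      have hnodf : ((((PySem.Set.ofList t).filter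
          ((fun (kv : Char × Int) => kv.2 == H) ∘ (fun k => (k, (t.count k : Int))))).map
          (fun k => (k, (t.count k : Int)))).map Prod.fst).Nodup := by
        rw [List.map_map]
        have hid : (Prod.fst ∘ fun k => (k, (t.count k : Int))) = id := rfl
        rw [hid, List.map_id]
        exact (PySem.Set.nodup_ofList t).filter _
      rw [PySem.Dict.items_foldl_insert_fresh _ Prod.fst Prod.snd PySem.Dict.empty
        (by intro a _; simp [PySem.Dict.contains_empty]) hnodf]
      simp only [PySem.Dict.empty, List.nil_append]
      rw [List.map_map]
      apply List.map_congr_left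
      intro k hk
      have : ((t.count k : Int) == H) = true := by
        have := List.of_mem_filter hk
        simpa using this
      simp only [Function.comp]
      have hkH : (t.count k : Int) = H := by simpa using this
      simp [hkH]
    -- B's comprehension over the string
    have hB : ((t.foldl (fun d c =>
          if (PySem.Dict.ofList (pvRuns s) : PySem.Dict Char Int).getD c 0 == H
          then d.insert c H else d) PySem.Dict.empty).items)
        = ((PySem.Set.ofList t).filter (fun k => (t.count k : Int) == H)).map (fun k => (k, H)) := by
      rw [PySem.List.foldl_congr_mem t _
        (fun d c => if (t.count c : Int) == H then d.insert c H else d) PySem.Dict.empty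
        (by intro acc x hx; rw [hgetD x hx])]
      rw [PySem.List.foldl_if_eq_foldl_filter (fun (c : Char) => (t.count c : Int) == H)
        (fun (d : PySem.Dict Char Int) (c : Char) => d.insert c H)]
      have hkeysf : ((t.filter (fun c => (t.count c : Int) == H)).foldl
          (fun d c => d.insert c H) (PySem.Dict.empty : PySem.Dict Char Int)).keys
          = PySem.Set.ofList (t.filter (fun c => (t.count c : Int) == H)) := by
        rw [PySem.Dict.keys_foldl_insert _ (fun _ _ => H) PySem.Dict.empty]
        rfl
      have hnodk : ((t.filter (fun c => (t.count c : Int) == H)).foldl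
          (fun d c => d.insert c H) (PySem.Dict.empty : PySem.Dict Char Int)).keys.Nodup := by
        exact PySem.Dict.nodup_keys_foldl_insert _ (fun _ _ => H) PySem.Dict.empty
          (by simp [PySem.Dict.keys, PySem.Dict.empty])
      have hvalsH := pvFold_values_const H (t.filter (fun c => (t.count c : Int) == H))
        PySem.Dict.empty (by simp [PySem.Dict.values, PySem.Dict.empty])
      rw [pvItems_const H _ hnodk hvalsH, hkeysf, pvOfList_filter]
    simp only [hA, hB]
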